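-- pv_equiv track=rewrite | github.com/Tom1779/Leetcode | 3531 - Count Covered Buildings/main.py | countCoveredBuildings
-- ===== SOURCE A (Python) =====
-- from typing import List
--
-- def countCoveredBuildings(n: int, buildings: List[List[int]]) -> int:
--     x_dict = {}
--     y_dict = {}
--     covered = 0
--
--     for building in buildings:
--         if not building[0] in x_dict.keys():
--             x_dict[building[0]] = [building[1],building[1]]
--         else:
--             if building[1] < x_dict[building[0]][0]:
--                 x_dict[building[0]][0] = building[1]
--             if building[1] > x_dict[building[0]][1]:
--                 x_dict[building[0]][1] = building[1]
--         if not building[1] in y_dict.keys():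
--             y_dict[building[1]] = [building[0],building[0]]
--         else:
--             if building[0] < y_dict[building[1]][0]:
--                 y_dict[building[1]][0] = building[0]
--             if building[0] > y_dict[building[1]][1]:
--                 y_dict[building[1]][1] = building[0]
--
--     for building in buildings:
--         above = False
--         below = False
--         left = False
--         right = False
--         if x_dict[building[0]][1] > building[1]:
--             above = True
--         else:
--             continue
--         if x_dict[building[0]][0] < building[1]:
--             below = True
--         else:
--             continue
--         if y_dict[building[1]][1] > building[0]:
--             right = True
--         else:
--             continue
--         if y_dict[building[1]][0] < building[0]:
--             left = True
--         if left:
--             covered += 1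
--
--
--     return covered
-- ===== SOURCE B (Python) =====
-- def countCoveredBuildings(n, buildings):
--     pts = [(b[0], b[1]) for b in buildings]
--     count = 0
--     for x, y in pts:
--         if (any(px == x and py > y for px, py in pts)
--                 and any(px == x and py < y for px, py in pts)
--                 and any(py == y and px > x for px, py in pts)
--                 and any(py == y and px < x for px, py in pts)):
--             count += 1
--     return count
-- ===== Notes on version B (the rewrite author's own statement) =====
-- stated objective: alternative
-- what changed: Replaces A's two-pass scheme (dicts of running per-column/per-row min-max extremes, then lookups) with a direct quantifier-style scan: a building is covered iff some building lies strictly beyond it in each of the four directions, checked with four any() scans per building.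
import Mathlib
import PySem

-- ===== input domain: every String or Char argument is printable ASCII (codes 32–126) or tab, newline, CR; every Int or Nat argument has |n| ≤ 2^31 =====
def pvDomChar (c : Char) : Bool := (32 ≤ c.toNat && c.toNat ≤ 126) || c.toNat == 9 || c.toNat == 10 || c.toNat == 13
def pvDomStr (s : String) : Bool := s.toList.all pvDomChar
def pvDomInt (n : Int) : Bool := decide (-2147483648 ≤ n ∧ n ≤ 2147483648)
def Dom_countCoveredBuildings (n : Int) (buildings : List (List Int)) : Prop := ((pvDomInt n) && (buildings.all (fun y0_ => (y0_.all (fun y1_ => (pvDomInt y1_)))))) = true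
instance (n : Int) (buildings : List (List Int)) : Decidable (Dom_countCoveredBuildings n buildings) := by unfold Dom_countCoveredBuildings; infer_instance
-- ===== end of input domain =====

-- B replaces A's two-pass scheme (dicts of running per-column/per-row min/max extremes, then
-- lookups) with four direct existence scans per building (same result; B is not faster).

-- ===== PORT A =====
-- the common body of A's two symmetric dict-update blocks: the membership test, then either a
-- fresh [v, v] entry or the two in-place min/max ifs
def cbUpdate (d : PySem.Dict Int (Int × Int)) (k v : Int) : PySem.Dict Int (Int × Int) :=
  if ¬ d.contains k then d.insert k (v, v)
  else
    let p := d.getD k (0, 0)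
    let p := if v < p.1 then (v, p.2) else p
    let p := if p.2 < v then (p.1, v) else p
    d.insert k p

def countCoveredBuildings (n : Int) (buildings : List (List Int)) : Int :=
  let dicts := buildings.foldl
    (fun (s : PySem.Dict Int (Int × Int) × PySem.Dict Int (Int × Int)) b =>
      (cbUpdate s.1 (PySem.List.pyGetD b 0 0) (PySem.List.pyGetD b 1 0),
       cbUpdate s.2 (PySem.List.pyGetD b 1 0) (PySem.List.pyGetD b 0 0)))
    (PySem.Dict.empty, PySem.Dict.empty)
  buildings.foldl
    (fun covered b =>
      let x := PySem.List.pyGetD b 0 0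
      let y := PySem.List.pyGetD b 1 0
      if y < (dicts.1.getD x (0, 0)).2 then            -- above, else continue
        if (dicts.1.getD x (0, 0)).1 < y then          -- below, else continue
          if x < (dicts.2.getD y (0, 0)).2 then        -- right, else continue
            if (dicts.2.getD y (0, 0)).1 < x then      -- left
              covered + 1
            else covered
          else covered
        else covered
      else covered)
    0

-- ===== PORT B =====
def countCoveredBuildings_alt (n : Int) (buildings : List (List Int)) : Int :=
  let pts := buildings.map (fun b => (PySem.List.pyGetD b 0 0, PySem.List.pyGetD b 1 0))
  pts.foldl
    (fun count p =>
      if ((pts.any fun q => q.1 == p.1 && p.2 < q.2) &&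
          (pts.any fun q => q.1 == p.1 && q.2 < p.2) &&
          (pts.any fun q => q.2 == p.2 && p.1 < q.1) &&
          (pts.any fun q => q.2 == p.2 && q.1 < p.1))
      then count + 1 else count)
    0

-- ===== PRECONDITION & SPEC =====
-- A raises IndexError (building[1]) when some building has fewer than two entries; B raises
-- there too, so exactly those inputs are excluded.
def Pre_countCoveredBuildings (n : Int) (buildings : List (List Int)) : Prop :=
  ∀ b ∈ buildings, 2 ≤ b.length
instance (n : Int) (buildings : List (List Int)) : Decidable (Pre_countCoveredBuildings n buildings) := by
  unfold Pre_countCoveredBuildings; infer_instance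

def pvWitness_countCoveredBuildings : Int × List (List Int) :=
  (9, [[1, 2], [2, 1], [2, 2], [2, 3], [3, 2]])

def Spec_countCoveredBuildings (n : Int) (buildings : List (List Int)) (out : Int) : Prop := out = countCoveredBuildings_alt n buildings
instance (n : Int) (buildings : List (List Int)) (out : Int) : Decidable (Spec_countCoveredBuildings n buildings out) := by unfold Spec_countCoveredBuildings; infer_instance

-- ===== CLAIM (what is proved, stated in full; the proofs are below) =====
def Claim_equal_countCoveredBuildings : Prop := ∀ (n : Int) (buildings : List (List Int)), Dom_countCoveredBuildings n buildings → Pre_countCoveredBuildings n buildings → Spec_countCoveredBuildings n buildings (countCoveredBuildings n buildings)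

-- ===== LEMMAS AND PROOFS =====

-- A's update, rephrased through get? : insert the running (min, max) at key k
def cbMM : Option (Int × Int) → Int → Int × Int
  | none, v => (v, v)
  | some (lo, hi), v => (min lo v, max hi v)

theorem cbUpdate_eq (d : PySem.Dict Int (Int × Int)) (k v : Int) :
    cbUpdate d k v = d.insert k (cbMM (d.get? k) v) := by
  unfold cbUpdate
  rw [PySem.Dict.contains_eq_isSome_get?, PySem.Dict.getD_eq_get?_getD]
  cases h : d.get? k with
  | none => simp [cbMM]
  | some p =>
    obtain ⟨lo, hi⟩ := p
    rw [if_neg (by simp)]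
    simp only [Option.getD_some, cbMM]
    congr 1
    split_ifs <;> rw [Prod.ext_iff] <;> constructor <;> simp <;> omega

theorem foldl_cbMM_some (vs : List Int) (lo hi : Int) :
    vs.foldl (fun c v => some (cbMM c v)) (some (lo, hi))
      = some (vs.foldl min lo, vs.foldl max hi) := by
  induction vs generalizing lo hi with
  | nil => rfl
  | cons v vs ih =>
    rw [List.foldl_cons, List.foldl_cons, List.foldl_cons]
    exact ih (min lo v) (max hi v)

-- the single-dict fold, seen through get? at a fixed key x
theorem foldl_cbUpdate_get? (f g : List Int → Int) (bs : List (List Int))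
    (d : PySem.Dict Int (Int × Int)) (x : Int) :
    (bs.foldl (fun d b => cbUpdate d (f b) (g b)) d).get? x
      = ((bs.filter (fun b => f b == x)).map g).foldl (fun c v => some (cbMM c v)) (d.get? x) := by
  induction bs generalizing d with
  | nil => rfl
  | cons b bs ih =>
    rw [List.foldl_cons, cbUpdate_eq, ih, List.filter_cons]
    by_cases hx : f b = x
    · rw [hx, PySem.Dict.get?_insert_self]
      simp
    · rw [PySem.Dict.get?_insert_of_ne _ _ (Ne.symm hx)]
      simp [hx]

theorem foldl_min_lt (vs : List Int) (lo w : Int) :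
    vs.foldl min lo < w ↔ lo < w ∨ ∃ v ∈ vs, v < w := by
  induction vs generalizing lo with
  | nil => simp
  | cons v vs ih => simp [List.foldl, ih]; tauto

theorem lt_foldl_max (vs : List Int) (hi w : Int) :
    w < vs.foldl max hi ↔ w < hi ∨ ∃ v ∈ vs, w < v := by
  induction vs generalizing hi with
  | nil => simp
  | cons v vs ih => simp [List.foldl, ih]; tauto

-- the fact A's second loop relies on: the pair stored at key f b is the strict lower/upper
-- envelope of the g-values of the buildings sharing that key
theorem dict_char (f g : List Int → Int) (bs : List (List Int)) (b : List Int)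
    (hb : b ∈ bs) (w : Int) :
    (((bs.foldl (fun d b => cbUpdate d (f b) (g b)) PySem.Dict.empty).getD (f b) (0, 0)).1 < w
        ↔ ∃ b2 ∈ bs, f b2 = f b ∧ g b2 < w)
    ∧ (w < ((bs.foldl (fun d b => cbUpdate d (f b) (g b)) PySem.Dict.empty).getD (f b) (0, 0)).2
        ↔ ∃ b2 ∈ bs, f b2 = f b ∧ w < g b2) := by
  have hmem : g b ∈ (bs.filter (fun b2 => f b2 == f b)).map g :=
    List.mem_map_of_mem (List.mem_filter.mpr ⟨hb, by simp⟩)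
  have hget := foldl_cbUpdate_get? f g bs PySem.Dict.empty (f b)
  rw [PySem.Dict.get?_empty] at hget
  have hiff : ∀ (P : Int → Prop), ((∃ v ∈ (bs.filter (fun b2 => f b2 == f b)).map g, P v)
      ↔ ∃ b2 ∈ bs, f b2 = f b ∧ P (g b2)) := by
    intro P
    constructor
    · rintro ⟨v, hv, hP⟩
      obtain ⟨b2, hb2, rfl⟩ := List.mem_map.mp hv
      have := List.mem_filter.mp hb2
      exact ⟨b2, this.1, by simpa using this.2, hP⟩
    · rintro ⟨b2, hb2, he, hP⟩
      exact ⟨g b2, List.mem_map_of_mem (List.mem_filter.mpr ⟨hb2, by simp [he]⟩), hP⟩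
  cases hvs : (bs.filter (fun b2 => f b2 == f b)).map g with
  | nil => rw [hvs] at hmem; simp at hmem
  | cons v0 rest =>
    rw [hvs] at hget
    rw [List.foldl_cons] at hget
    rw [show cbMM none v0 = (v0, v0) from rfl, foldl_cbMM_some] at hget
    rw [PySem.Dict.getD_eq_get?_getD, hget]
    constructor
    · rw [Option.getD_some]
      have := hiff (fun v => v < w)
      rw [hvs] at this
      simp only [List.mem_cons] at this
      rw [foldl_min_lt, ← this]
      constructor
      · rintro (h | ⟨v, hv, hlt⟩)
        · exact ⟨v0, Or.inl rfl, h⟩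
        · exact ⟨v, Or.inr hv, hlt⟩
      · rintro ⟨v, (rfl | hv), hlt⟩
        · exact Or.inl hlt
        · exact Or.inr ⟨v, hv, hlt⟩
    · rw [Option.getD_some]
      have := hiff (fun v => w < v)
      rw [hvs] at this
      simp only [List.mem_cons] at this
      rw [lt_foldl_max, ← this]
      constructor
      · rintro (h | ⟨v, hv, hlt⟩)
        · exact ⟨v0, Or.inl rfl, h⟩
        · exact ⟨v, Or.inr hv, hlt⟩
      · rintro ⟨v, (rfl | hv), hlt⟩
        · exact Or.inl hlt
        · exact Or.inr ⟨v, hv, hlt⟩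

-- A's continue-chain is one conjunction
theorem ite_nested (c1 c2 c3 c4 : Prop) [Decidable c1] [Decidable c2] [Decidable c3]
    [Decidable c4] (a acc : Int) :
    (if c1 then if c2 then if c3 then if c4 then a else acc else acc else acc else acc)
      = if c1 ∧ c2 ∧ c3 ∧ c4 then a else acc := by
  split_ifs <;> tauto

theorem cover_count_eq (n : Int) (buildings : List (List Int)) :
    countCoveredBuildings n buildings = countCoveredBuildings_alt n buildings := by
  unfold countCoveredBuildings countCoveredBuildings_alt
  rw [PySem.List.foldl_prod_mk (fun d b => cbUpdate d (PySem.List.pyGetD b 0 0) (PySem.List.pyGetD b 1 0))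
      (fun d b => cbUpdate d (PySem.List.pyGetD b 1 0) (PySem.List.pyGetD b 0 0))]
  rw [List.foldl_map]
  apply PySem.List.foldl_congr_mem
  intro acc b hb
  obtain ⟨h1lo, h1hi⟩ := dict_char (fun b => PySem.List.pyGetD b 0 0)
    (fun b => PySem.List.pyGetD b 1 0) buildings b hb (PySem.List.pyGetD b 1 0)
  obtain ⟨h2lo, h2hi⟩ := dict_char (fun b => PySem.List.pyGetD b 1 0)
    (fun b => PySem.List.pyGetD b 0 0) buildings b hb (PySem.List.pyGetD b 0 0)
  rw [ite_nested]
  apply if_congr _ rfl rfl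
  simp only [Bool.and_eq_true, List.any_eq_true, List.mem_map, beq_iff_eq,
    decide_eq_true_eq, exists_exists_and_eq_and]
  constructor
  · rintro ⟨hA1, hA2, hA3, hA4⟩
    exact ⟨⟨⟨h1hi.mp hA1, h1lo.mp hA2⟩, h2hi.mp hA3⟩, h2lo.mp hA4⟩
  · rintro ⟨⟨⟨e1, e2⟩, e3⟩, e4⟩
    exact ⟨h1hi.mpr e1, h1lo.mpr e2, h2hi.mpr e3, h2lo.mpr e4⟩

-- ===== VERDICT (by name: the statement is the Claim_ definition above) =====
theorem countCoveredBuildings_spec : Claim_equal_countCoveredBuildings := by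
  intro n buildings _ _
  unfold Spec_countCoveredBuildings
  exact cover_count_eq n buildings
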